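-- pv_equiv track=rewrite | github.com/DiogoAADCosta/guitar-diagnostic-system | engines/validation_engine/v9/code.py | calcular_score_teste_completo
-- ===== SOURCE A (Python) =====
-- def calcular_score_teste_completo(erros_interface):
--     cont_cifra = 0
--     cont_diagrama = 0
--     cont_tablatura = 0
--     if len(erros_interface) == 0:
--         sabe_ler_cifra = True
--         sabe_ler_diagrama = True
--         sabe_ler_tablatura = True
--         return sabe_ler_cifra, sabe_ler_diagrama, sabe_ler_tablatura
--     else:
--         for erro in erros_interface:
--             if erro['interface'] == 'leitura_cifras':
--                 cont_cifra += 1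
--             if erro['interface'] == 'diagrama_braco':
--                 cont_diagrama += 1
--             if erro['interface'] == 'leitura_tablatura':
--                 cont_tablatura += 1
--     sabe_ler_cifra = True if cont_cifra == 0 else False
--     sabe_ler_diagrama = True if cont_diagrama == 0 else False
--     sabe_ler_tablatura = True if cont_tablatura == 0 else False
--     return sabe_ler_cifra, sabe_ler_diagrama, sabe_ler_tablatura
-- ===== SOURCE B (Python) =====
-- def calcular_score_teste_completo(erros_interface):
--     alvos = ('leitura_cifras', 'diagrama_braco', 'leitura_tablatura')
--     return tuple(all(e['interface'] != alvo for e in erros_interface)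
--                  for alvo in alvos)
-- ===== Notes on version B (the rewrite author's own statement) =====
-- stated objective: simpler
-- what changed: Replaces A's single pass maintaining three integer counters (plus an empty-list special case) by three staged short-circuiting scans, one per interface name, each deciding absence directly with all().
import Mathlib
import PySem

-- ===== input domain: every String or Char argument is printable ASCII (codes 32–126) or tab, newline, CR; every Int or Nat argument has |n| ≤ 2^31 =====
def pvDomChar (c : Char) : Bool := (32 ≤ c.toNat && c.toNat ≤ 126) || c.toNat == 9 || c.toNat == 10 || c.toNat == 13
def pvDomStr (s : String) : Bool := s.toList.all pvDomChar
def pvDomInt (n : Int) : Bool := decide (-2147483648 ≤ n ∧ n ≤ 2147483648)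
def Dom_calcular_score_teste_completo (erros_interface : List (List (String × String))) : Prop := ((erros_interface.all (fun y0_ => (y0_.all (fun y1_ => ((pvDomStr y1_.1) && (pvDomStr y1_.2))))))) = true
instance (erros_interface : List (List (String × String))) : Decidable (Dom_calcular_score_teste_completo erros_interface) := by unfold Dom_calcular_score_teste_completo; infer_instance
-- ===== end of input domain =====

-- ===== PORT A =====
-- B replaces A's single counting pass (plus empty-list special case) by three staged scans, one per interface name (objective: simpler).
-- erro['interface'] — first-match association-list lookup; Pre_ guarantees the key is present (Python raises KeyError otherwise)
def pvInterface (erro : List (String × String)) : String :=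
  ((PySem.Dict.mk erro).getD "interface" "")

-- one iteration of A's loop body: the three independent 'if' counter updates, in order
def pvStep (c : Int × Int × Int) (erro : List (String × String)) : Int × Int × Int :=
  let c := if pvInterface erro == "leitura_cifras" then (c.1 + 1, c.2.1, c.2.2) else c
  let c := if pvInterface erro == "diagrama_braco" then (c.1, c.2.1 + 1, c.2.2) else c
  if pvInterface erro == "leitura_tablatura" then (c.1, c.2.1, c.2.2 + 1) else c

def calcular_score_teste_completo (erros_interface : List (List (String × String))) : Bool × Bool × Bool :=
  if erros_interface.length == 0 then
    (true, true, true)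
  else
    let (cont_cifra, cont_diagrama, cont_tablatura) :=
      erros_interface.foldl pvStep ((0 : Int), (0 : Int), (0 : Int))
    (if cont_cifra == 0 then true else false,
     if cont_diagrama == 0 then true else false,
     if cont_tablatura == 0 then true else false)

-- ===== PORT B =====
-- all(e['interface'] != alvo for e in erros_interface): one short-circuiting scan per target
def pvAbsent (erros_interface : List (List (String × String))) (alvo : String) : Bool :=
  erros_interface.all (fun e => pvInterface e != alvo)

def calcular_score_teste_completo_alt (erros_interface : List (List (String × String))) : Bool × Bool × Bool :=
  (pvAbsent erros_interface "leitura_cifras",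
   pvAbsent erros_interface "diagrama_braco",
   pvAbsent erros_interface "leitura_tablatura")

-- ===== PRECONDITION & SPEC =====
-- Pre_ excludes inputs where some element lacks the 'interface' key: there Python A raises KeyError.
def Pre_calcular_score_teste_completo (erros_interface : List (List (String × String))) : Prop :=
  ∀ erro ∈ erros_interface, (PySem.Dict.mk erro).contains "interface" = true
instance (erros_interface : List (List (String × String))) : Decidable (Pre_calcular_score_teste_completo erros_interface) := by
  unfold Pre_calcular_score_teste_completo; infer_instance

def pvWitness_calcular_score_teste_completo : (List (List (String × String))) :=
  [[("interface", "leitura_cifras")], [("interface", "outro")]]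

def Spec_calcular_score_teste_completo (erros_interface : List (List (String × String))) (out : Bool × Bool × Bool) : Prop := out = calcular_score_teste_completo_alt erros_interface
instance (erros_interface : List (List (String × String))) (out : Bool × Bool × Bool) : Decidable (Spec_calcular_score_teste_completo erros_interface out) := by unfold Spec_calcular_score_teste_completo; infer_instance

-- ===== CLAIM (what is proved, stated in full; the proofs are below) =====
def Claim_equal_calcular_score_teste_completo : Prop := ∀ (erros_interface : List (List (String × String))), Dom_calcular_score_teste_completo erros_interface → Pre_calcular_score_teste_completo erros_interface → Spec_calcular_score_teste_completo erros_interface (calcular_score_teste_completo erros_interface)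

-- ===== LEMMAS AND PROOFS =====

-- A's fold adds, to each starting counter, the number of elements whose interface is that tag.
lemma foldA_eq (l : List (List (String × String))) (c1 c2 c3 : Int) :
    l.foldl pvStep (c1, c2, c3)
    = (c1 + ((l.map pvInterface).count "leitura_cifras" : Int),
       c2 + ((l.map pvInterface).count "diagrama_braco" : Int),
       c3 + ((l.map pvInterface).count "leitura_tablatura" : Int)) := by
  induction l generalizing c1 c2 c3 with
  | nil => simp
  | cons e t ih =>
    simp only [List.foldl_cons, List.map_cons, List.count_cons]
    by_cases h1 : pvInterface e = "leitura_cifras" <;>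
      by_cases h2 : pvInterface e = "diagrama_braco" <;>
        by_cases h3 : pvInterface e = "leitura_tablatura" <;>
          simp [pvStep, h1, h2, h3, ih, Prod.ext_iff] <;> omega

-- a tag's count is zero exactly when B's scan finds no element with that tag
lemma count_zero_eq_absent (l : List (List (String × String))) (s : String) :
    ((((l.map pvInterface).count s : Int)) == 0) = pvAbsent l s := by
  rw [Bool.eq_iff_iff]
  simp [pvAbsent, List.count_eq_zero, List.all_eq_true]

-- ===== VERDICT (by name: the statement is the Claim_ definition above) =====
theorem calcular_score_teste_completo_spec : Claim_equal_calcular_score_teste_completo := by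
  intro l _ _
  unfold Spec_calcular_score_teste_completo calcular_score_teste_completo calcular_score_teste_completo_alt
  rcases l with _ | ⟨e, t⟩
  · decide
  · simp only [List.length_cons, foldA_eq, zero_add]
    simp only [count_zero_eq_absent]
    simp
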